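-- pv_equiv track=rewrite | github.com/opluke/Graph-based-Agent-Memory-for-RAG | main.py | _extract_simple_answer
-- ===== SOURCE A (Python) =====
-- def _extract_simple_answer(context, question):
--     q_lower = question.lower()
--     context_lower = context.lower()
--
--     sentences = context.split('.')
--     for sentence in sentences:
--         if any(word in sentence.lower() for word in q_lower.split()):
--             return sentence.strip()
--
--     return "Unable to find answer in context"
-- ===== SOURCE B (Python) =====
-- def _extract_simple_answer(context, question):
--     sentences = context.split('.')
--     lowered = [s.lower() for s in sentences]
--     best = None
--     for w in question.lower().split():
--         i = next((i for i, s in enumerate(lowered) if w in s), None)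
--         if i is not None and (best is None or i < best):
--             best = i
--     if best is None:
--         return "Unable to find answer in context"
--     return sentences[best].strip()
-- ===== Notes on version B (the rewrite author's own statement) =====
-- stated objective: alternative
-- what changed: Inverts the loop nesting: instead of scanning sentences and testing any question word per sentence, B finds for each question word the index of the first sentence containing it and returns the sentence at the minimal such index.
import Mathlib
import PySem

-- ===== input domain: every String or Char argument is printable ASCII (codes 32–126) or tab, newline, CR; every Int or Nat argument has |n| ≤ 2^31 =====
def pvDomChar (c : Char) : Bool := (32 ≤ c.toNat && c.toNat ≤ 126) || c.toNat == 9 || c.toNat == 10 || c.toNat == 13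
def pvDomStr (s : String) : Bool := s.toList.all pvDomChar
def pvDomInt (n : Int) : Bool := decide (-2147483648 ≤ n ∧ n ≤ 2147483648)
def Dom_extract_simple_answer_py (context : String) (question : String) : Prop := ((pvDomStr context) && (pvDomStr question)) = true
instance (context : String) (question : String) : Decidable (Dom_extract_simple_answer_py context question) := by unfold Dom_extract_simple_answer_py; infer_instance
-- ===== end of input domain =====

-- B inverts A's loop nesting: per question word it finds the first matching sentence index and keeps the minimum (objective: alternative; same cost).

-- ===== PORT A =====
-- A's 'for sentence in sentences: if any(...) return sentence.strip()' loop (strings ported on the List Char side)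
def pvLoopA (words : List (List Char)) : List (List Char) → String
  | [] => "Unable to find answer in context"
  | s :: rest =>
    if words.any (fun w => PySem.Chars.isIn w (PySem.Chars.lower s)) then String.ofList (PySem.Chars.strip s)
    else pvLoopA words rest

def extract_simple_answer_py (context : String) (question : String) : String :=
  let q_lower := PySem.Chars.lower question.toList
  let _context_lower := PySem.Chars.lower context.toList   -- computed and unused, as in A
  let sentences := PySem.Chars.splitOn context.toList ['.']
  pvLoopA (PySem.Chars.split₀ q_lower) sentences

-- ===== PORT B =====
def extract_simple_answer_py_alt (context : String) (question : String) : String :=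
  let sentences := PySem.Chars.splitOn context.toList ['.']
  let lowered := sentences.map PySem.Chars.lower
  let best := (PySem.Chars.split₀ (PySem.Chars.lower question.toList)).foldl
    (fun best w =>
      match lowered.findIdx? (fun s => PySem.Chars.isIn w s) with
      | none => best
      | some i =>
        match best with
        | none => some i
        | some b => if i < b then some i else some b) none
  match best with
  | none => "Unable to find answer in context"
  | some b => String.ofList (PySem.Chars.strip (sentences.getD b []))

-- ===== PRECONDITION & SPEC =====
def Spec_extract_simple_answer_py (context : String) (question : String) (out : String) : Prop := out = extract_simple_answer_py_alt context question
instance (context : String) (question : String) (out : String) : Decidable (Spec_extract_simple_answer_py context question out) := by unfold Spec_extract_simple_answer_py; infer_instance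

-- ===== CLAIM (what is proved, stated in full; the proofs are below) =====
def Claim_equal_extract_simple_answer_py : Prop := ∀ (context : String) (question : String), Dom_extract_simple_answer_py context question → Spec_extract_simple_answer_py context question (extract_simple_answer_py context question)

-- ===== LEMMAS AND PROOFS =====

-- the option-minimum B's fold accumulates
def pvOptMin (a b : Option Nat) : Option Nat :=
  match b with
  | none => a
  | some i =>
    match a with
    | none => some i
    | some x => if i < x then some i else some x

theorem pvOptMin_some_zero (a : Option Nat) : pvOptMin a (some 0) = some 0 := by
  cases a with
  | none => rfl
  | some x =>
    simp only [pvOptMin]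
    split
    · rfl
    · simp only [Option.some.injEq]; omega

theorem pvFoldl_optMin_of_zero_mem (l : List (Option Nat)) (h : some 0 ∈ l) (a : Option Nat) :
    l.foldl pvOptMin a = some 0 := by
  induction l generalizing a with
  | nil => cases h
  | cons x xs ih =>
    rcases List.mem_cons.mp h with h0 | hm
    · subst h0
      rw [List.foldl_cons, pvOptMin_some_zero]
      clear h ih
      induction xs generalizing a with
      | nil => rfl
      | cons y ys ih2 =>
        rw [List.foldl_cons]
        have : pvOptMin (some 0) y = some 0 := by
          cases y with
          | none => rfl
          | some i => simp only [pvOptMin]; split <;> simp_all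
        rw [this]; exact ih2 (a := some 0)
    · exact xs.foldl_cons .. ▸ ih hm _

theorem pvOptMin_map_succ (a b : Option Nat) :
    pvOptMin (a.map (· + 1)) (b.map (· + 1)) = (pvOptMin a b).map (· + 1) := by
  cases a <;> cases b <;> simp only [pvOptMin, Option.map_some, Option.map_none] <;> try rfl
  split <;> split <;> simp_all <;> omega

theorem pvFoldl_optMin_map_succ (l : List (Option Nat)) (a : Option Nat) :
    (l.map (Option.map (· + 1))).foldl pvOptMin (a.map (· + 1)) = (l.foldl pvOptMin a).map (· + 1) := by
  induction l generalizing a with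
  | nil => rfl
  | cons x xs ih => simp only [List.map_cons, List.foldl_cons, pvOptMin_map_succ, ih]

-- the word-major minimum of first-match indices is the first index matching any word
theorem pvKey {W S : Type} (q : W → S → Bool) (ls : List S) (ws : List W) :
    (ws.map (fun w => ls.findIdx? (fun s => q w s))).foldl pvOptMin none
      = ls.findIdx? (fun s => ws.any (fun w => q w s)) := by
  induction ls with
  | nil =>
    simp only [List.findIdx?_nil]
    induction ws with
    | nil => rfl
    | cons w ws ih => simpa [pvOptMin] using ih
  | cons s ls ih =>
    by_cases hw : ws.any (fun w => q w s)
    · rw [List.findIdx?_cons]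
      simp only [hw, if_pos]
      apply pvFoldl_optMin_of_zero_mem
      rcases List.any_eq_true.mp hw with ⟨w, hwm, hq⟩
      refine List.mem_map.mpr ⟨w, hwm, ?_⟩
      rw [List.findIdx?_cons, hq]; rfl
    · have hall : ∀ w ∈ ws, q w s = false := by
        intro w hwm
        by_contra hc
        exact hw (List.any_eq_true.mpr ⟨w, hwm, by simpa using hc⟩)
      have hmap : ws.map (fun w => (s :: ls).findIdx? (fun t => q w t))
          = (ws.map (fun w => ls.findIdx? (fun t => q w t))).map (Option.map (· + 1)) := by
        rw [List.map_map]
        apply List.map_congr_left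
        intro w hwm
        simp [List.findIdx?_cons, hall w hwm]
      rw [hmap, List.findIdx?_cons]
      simp only [hw, cond_false]
      have := pvFoldl_optMin_map_succ (ws.map (fun w => ls.findIdx? (fun t => q w t))) none
      simpa [ih] using this

-- A's loop through findIdx?
theorem pvLoopA_eq (words : List (List Char)) (ss : List (List Char)) :
    pvLoopA words ss
      = match ss.findIdx? (fun s => words.any (fun w => PySem.Chars.isIn w (PySem.Chars.lower s))) with
        | none => "Unable to find answer in context"
        | some i => String.ofList (PySem.Chars.strip (ss.getD i [])) := by
  induction ss with
  | nil => rfl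
  | cons s rest ih =>
    rw [pvLoopA, List.findIdx?_cons]
    by_cases h : words.any (fun w => PySem.Chars.isIn w (PySem.Chars.lower s))
    · simp [h]
    · simp only [h, if_false, ih, Bool.false_eq_true]
      cases rest.findIdx? (fun t => words.any (fun w => PySem.Chars.isIn w (PySem.Chars.lower t))) with
      | none => rfl
      | some i => simp

-- B's fold body is pvOptMin of best and this word's first index
theorem pvFoldB_eq (lowered : List (List Char)) (ws : List (List Char)) (a : Option Nat) :
    ws.foldl (fun best w =>
      match lowered.findIdx? (fun s => PySem.Chars.isIn w s) with
      | none => best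
      | some i =>
        match best with
        | none => some i
        | some b => if i < b then some i else some b) a
    = (ws.map (fun w => lowered.findIdx? (fun s => PySem.Chars.isIn w s))).foldl pvOptMin a := by
  induction ws generalizing a with
  | nil => rfl
  | cons w ws ih =>
    simp only [List.map_cons, List.foldl_cons, ih]
    congr 1

-- ===== VERDICT (by name: the statement is the Claim_ definition above) =====
theorem extract_simple_answer_py_spec : Claim_equal_extract_simple_answer_py := by
  intro context question _
  unfold Spec_extract_simple_answer_py extract_simple_answer_py extract_simple_answer_py_alt
  simp only []
  set ss := PySem.Chars.splitOn context.toList ['.'] with hss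
  set ws := PySem.Chars.split₀ (PySem.Chars.lower question.toList) with hws
  rw [pvFoldB_eq]
  have hfm : ∀ w : List Char, (ss.map PySem.Chars.lower).findIdx? (fun s => PySem.Chars.isIn w s)
      = ss.findIdx? (fun s => PySem.Chars.isIn w (PySem.Chars.lower s)) := by
    intro w; rw [List.findIdx?_map]; rfl
  have hkey : (ws.map (fun w => (ss.map PySem.Chars.lower).findIdx? (fun s => PySem.Chars.isIn w s))).foldl pvOptMin none
      = ss.findIdx? (fun s => ws.any (fun w => PySem.Chars.isIn w (PySem.Chars.lower s))) := by
    rw [List.map_congr_left (fun w _ => hfm w)]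
    exact pvKey (fun w s => PySem.Chars.isIn w (PySem.Chars.lower s)) ss ws
  rw [hkey, pvLoopA_eq]
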